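-- pv_equiv track=rewrite | github.com/valentin-correa/UTN-2024 | UTN/1er año/AyED/Python/problema pero no como lo quiere el mario.py | switch_lights
-- ===== SOURCE A (Python) =====
-- def switch_lights(initial_config, num_changes):
--     n = len(initial_config)
--     final_config = list(initial_config)
--
--     for i in range(min(num_changes, n)):
--         if initial_config[i] == 'O':
--             final_config[i] = 'X'
--         else:
--             final_config[i] = 'O'
--
--     if n > 1:
--         for i in range(1, min(num_changes, n)):
--             if final_config[i - 1] == 'O':
--                 if final_config[i] == 'O':
--                     final_config[i] = 'X'
--                 else:
--                     final_config[i] = 'O'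
--
--     return ''.join(final_config)
-- ===== SOURCE B (Python) =====
-- def switch_lights(initial_config, num_changes):
--     m = max(0, min(num_changes, len(initial_config)))
--     parity = False
--     out = []
--     for c in initial_config[:m]:
--         parity ^= (c != 'O')
--         out.append('O' if parity else 'X')
--     return ''.join(out) + initial_config[m:]
-- ===== Notes on version B (the rewrite author's own statement) =====
-- stated objective: simpler
-- what changed: Replaced A's two passes (first flip every prefix character in place, then a second neighbor-dependent pass re-reading the previously finalized character) by a single left-to-right pass maintaining a running XOR-parity accumulator of the non-'O' input bits, emitting each output character directly and appending the untouched tail slice; one pass instead of two gives a constant-factor speedup.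
import Mathlib
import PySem

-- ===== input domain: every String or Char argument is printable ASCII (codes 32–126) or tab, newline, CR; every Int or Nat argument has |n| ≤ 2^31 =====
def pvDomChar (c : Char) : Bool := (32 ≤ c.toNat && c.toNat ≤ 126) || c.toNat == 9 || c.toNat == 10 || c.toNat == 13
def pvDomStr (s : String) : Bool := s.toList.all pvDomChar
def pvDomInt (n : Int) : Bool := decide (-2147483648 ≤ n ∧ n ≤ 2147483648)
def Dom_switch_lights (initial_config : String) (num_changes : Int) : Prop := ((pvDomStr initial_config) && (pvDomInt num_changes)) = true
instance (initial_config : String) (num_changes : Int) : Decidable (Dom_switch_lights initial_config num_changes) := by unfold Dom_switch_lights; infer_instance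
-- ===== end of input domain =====

-- B replaces A's two passes (flip the prefix in place, then a neighbor-dependent second pass
-- re-reading the previous finalized character) by one pass with a running XOR-parity accumulator;
-- objective: simpler.


-- ===== PORT A =====
def switch_lights (initial_config : String) (num_changes : Int) : String :=
  let n : Int := (initial_config.toList.length : Int)
  let fc0 : List Char := initial_config.toList
  let fc1 : List Char :=
    (PySem.List.pyRange 0 (min num_changes n) 1).foldl
      (fun fc i =>
        if (PySem.List.pyGet? initial_config.toList i).getD ' ' = 'O' then
          fc.set i.toNat 'X'
        else
          fc.set i.toNat 'O') fc0
  let fc2 : List Char :=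
    if n > 1 then
      (PySem.List.pyRange 1 (min num_changes n) 1).foldl
        (fun fc i =>
          if (PySem.List.pyGet? fc (i - 1)).getD ' ' = 'O' then
            (if (PySem.List.pyGet? fc i).getD ' ' = 'O' then
              fc.set i.toNat 'X'
            else
              fc.set i.toNat 'O')
          else fc) fc1
    else fc1
  String.ofList fc2

-- ===== PORT B =====
def switch_lights_alt (initial_config : String) (num_changes : Int) : String :=
  let m : Int := max 0 (min num_changes (initial_config.toList.length : Int))
  let r :=
    (PySem.List.slice initial_config.toList none (some m)).foldl
      (fun (acc : List Char × Bool) c =>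
        let p := xor acc.2 (c != 'O')
        (acc.1 ++ [if p then 'O' else 'X'], p))
      (([] : List Char), false)
  String.ofList (r.1 ++ PySem.List.slice initial_config.toList (some m) none)

-- ===== PRECONDITION & SPEC =====
def Spec_switch_lights (initial_config : String) (num_changes : Int) (out : String) : Prop := out = switch_lights_alt initial_config num_changes
instance (initial_config : String) (num_changes : Int) (out : String) : Decidable (Spec_switch_lights initial_config num_changes out) := by unfold Spec_switch_lights; infer_instance

-- ===== CLAIM (what is proved, stated in full; the proofs are below) =====
def Claim_equal_switch_lights : Prop := ∀ (initial_config : String) (num_changes : Int), Dom_switch_lights initial_config num_changes → Spec_switch_lights initial_config num_changes (switch_lights initial_config num_changes)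

-- ===== LEMMAS AND PROOFS =====

/-- flip one character the way A's first pass does -/
def pvFlip (c : Char) : Char := if c = 'O' then 'X' else 'O'

/-- reference: parity-scan of a prefix, returning output chars and final parity -/
def pvSpec : List Char → Bool → List Char × Bool
  | [], p => ([], p)
  | c :: cs, p =>
    let p' := xor p (c != 'O')
    let r := pvSpec cs p'
    ((if p' then 'O' else 'X') :: r.1, r.2)

theorem pvSpec_length (cs : List Char) (p : Bool) : (pvSpec cs p).1.length = cs.length := by
  induction cs generalizing p with
  | nil => rfl
  | cons c cs ih => simp [pvSpec, ih]

theorem pvSpec_append (xs ys : List Char) (p : Bool) :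
    pvSpec (xs ++ ys) p =
      ((pvSpec xs p).1 ++ (pvSpec ys (pvSpec xs p).2).1, (pvSpec ys (pvSpec xs p).2).2) := by
  induction xs generalizing p with
  | nil => rfl
  | cons c cs ih => simp [pvSpec, ih]

theorem pvFlip_pchar (c : Char) : pvFlip c = (if xor false (c != 'O') then 'O' else 'X') := by
  by_cases h : c = 'O' <;> simp [pvFlip, h]

/-- B's fold builds the parity scan -/
theorem foldB (cs : List Char) (acc : List Char) (p : Bool) :
    cs.foldl
      (fun (acc : List Char × Bool) c =>
        let p := xor acc.2 (c != 'O')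
        (acc.1 ++ [if p then 'O' else 'X'], p)) (acc, p)
    = (acc ++ (pvSpec cs p).1, (pvSpec cs p).2) := by
  induction cs generalizing acc p with
  | nil => simp [pvSpec]
  | cons c cs ih =>
    rw [List.foldl_cons]
    dsimp only
    rw [ih]
    simp [pvSpec]

theorem set_append_len {α : Type} (xs : List α) (y v : α) (ys : List α) (n : Nat)
    (h : n = xs.length) : (xs ++ y :: ys).set n v = xs ++ v :: ys := by
  subst h
  induction xs with
  | nil => rfl
  | cons x xs ih => simp [ih]

theorem pv_get_r {α : Type} (P : List α) (a b : α) (Z : List α) (r : Nat) (h : P.length = r) :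
    (P ++ a :: b :: Z)[r]? = some a := by
  subst h
  rw [List.getElem?_append_right (le_refl _)]
  simp

theorem pv_get_r1 {α : Type} (P : List α) (a b : α) (Z : List α) (r : Nat) (h : P.length = r) :
    (P ++ a :: b :: Z)[r + 1]? = some b := by
  subst h
  rw [List.getElem?_append_right (by omega)]
  simp

theorem pv_set_r1 {α : Type} (P : List α) (a b v : α) (Z : List α) (r : Nat) (h : P.length = r) :
    (P ++ a :: b :: Z).set (r + 1) v = P ++ a :: v :: Z := by
  subst h
  induction P with
  | nil => rfl
  | cons x P ih => simp [ih]

/-- A's first loop flips the first m characters -/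
theorem loopA1 (l : List Char) (m : Nat) (hm : m ≤ l.length) :
    (List.range m).foldl
      (fun fc j => if (l[j]?).getD ' ' = 'O' then fc.set j 'X' else fc.set j 'O') l
    = (l.take m).map pvFlip ++ l.drop m := by
  induction m with
  | zero => simp
  | succ m ih =>
    have hm' : m ≤ l.length := by omega
    have hlt : m < l.length := by omega
    rw [List.range_succ, List.foldl_append, ih hm']
    have hdrop : l.drop m = l[m] :: l.drop (m + 1) := List.drop_eq_getElem_cons hlt
    have hlen : ((l.take m).map pvFlip).length = m := by simp [hm']
    have hget : l[m]? = some l[m] := List.getElem?_eq_getElem hlt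
    have htake : l.take (m + 1) = l.take m ++ [l[m]] := by
      rw [List.take_add_one, hget]; rfl
    rw [hdrop]
    simp only [List.foldl_cons, List.foldl_nil, hget, Option.getD_some]
    by_cases h : l[m] = 'O'
    · rw [if_pos h, set_append_len _ _ _ _ _ hlen.symm, htake, List.map_append]
      simp [pvFlip, h]
    · rw [if_neg h, set_append_len _ _ _ _ _ hlen.symm, htake, List.map_append]
      simp [pvFlip, h]

/-- A's second loop: invariant after r iterations -/
theorem loopA2 (l : List Char) (m : Nat) (h2 : 2 ≤ m) (hm : m ≤ l.length) (r : Nat)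
    (hr : r + 1 ≤ m) :
    (List.range r).foldl
      (fun fc j =>
        if (fc[j]?).getD ' ' = 'O' then
          (if (fc[j+1]?).getD ' ' = 'O' then fc.set (j+1) 'X' else fc.set (j+1) 'O')
        else fc)
      ((l.take m).map pvFlip ++ l.drop m)
    = (pvSpec (l.take (r+1)) false).1 ++ ((l.take m).drop (r+1)).map pvFlip ++ l.drop m := by
  induction r with
  | zero =>
    cases l with
    | nil => simp at hm; omega
    | cons c l' =>
      cases m with
      | zero => omega
      | succ m' => simp [pvSpec, pvFlip]
  | succ r ih =>
    have hr2 : r + 2 ≤ m := by omega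
    have hrl0 : r < l.length := by omega
    have hrl1 : r + 1 < l.length := by omega
    rw [List.range_succ, List.foldl_append, ih (by omega)]
    simp only [List.foldl_cons, List.foldl_nil]
    have htr : l.take (r+1) = l.take r ++ [l[r]] := by
      rw [List.take_add_one, List.getElem?_eq_getElem hrl0]; rfl
    have htr2 : l.take (r+1+1) = l.take (r+1) ++ [l[r+1]] := by
      rw [List.take_add_one, List.getElem?_eq_getElem hrl1]; rfl
    have hmidlen : r + 1 < (l.take m).length := by
      rw [List.length_take]; omega
    have hmid : (l.take m).drop (r+1) = l[r+1] :: (l.take m).drop (r+1+1) := by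
      rw [List.drop_eq_getElem_cons hmidlen, List.getElem_take]
    have hP1 : pvSpec (l.take (r+1)) false
        = ((pvSpec (l.take r) false).1
            ++ [if xor (pvSpec (l.take r) false).2 (l[r] != 'O') then 'O' else 'X'],
           xor (pvSpec (l.take r) false).2 (l[r] != 'O')) := by
      rw [htr, pvSpec_append]; simp [pvSpec]
    have hP2 : pvSpec (l.take (r+1+1)) false
        = ((pvSpec (l.take (r+1)) false).1
            ++ [if xor (pvSpec (l.take (r+1)) false).2 (l[r+1] != 'O') then 'O' else 'X'],
           xor (pvSpec (l.take (r+1)) false).2 (l[r+1] != 'O')) := by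
      rw [htr2, pvSpec_append]; simp [pvSpec]
    have hPlen : (pvSpec (l.take r) false).1.length = r := by
      rw [pvSpec_length, List.length_take]; omega
    -- name the pieces
    set P := (pvSpec (l.take r) false).1 with hPdef
    set q := (pvSpec (l.take r) false).2 with hqdef
    rw [hP2, hP1]
    simp only [hmid, List.map_cons]
    rw [show P ++ [if xor q (l[r] != 'O') then 'O' else 'X']
          ++ (pvFlip l[r+1] :: ((l.take m).drop (r+1+1)).map pvFlip) ++ l.drop m
        = P ++ (if xor q (l[r] != 'O') then 'O' else 'X')
          :: pvFlip l[r+1] :: (((l.take m).drop (r+1+1)).map pvFlip ++ l.drop m) by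
      simp]
    rw [pv_get_r _ _ _ _ _ hPlen, pv_get_r1 _ _ _ _ _ hPlen]
    simp only [Option.getD_some]
    cases hp1 : xor q (l[r] != 'O') with
    | false =>
      rw [if_neg (by decide)]
      by_cases hc : l[r+1] = 'O' <;> simp [pvFlip, hc]
    | true =>
      rw [if_pos rfl, if_pos rfl]
      by_cases hc : l[r+1] = 'O'
      · rw [if_neg (by rw [hc]; decide), pv_set_r1 _ _ _ _ _ _ hPlen]
        simp [hc]
      · rw [if_pos (by simp [pvFlip, hc]), pv_set_r1 _ _ _ _ _ _ hPlen]
        simp [hc]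

/-- the flipped prefix of length ≤ 1 is already the parity scan -/
theorem key_small (l : List Char) (mm : Nat) (h : mm ≤ 1) :
    (l.take mm).map pvFlip = (pvSpec (l.take mm) false).1 := by
  interval_cases mm
  · simp [pvSpec]
  · cases l with
    | nil => simp [pvSpec]
    | cons c l' => simp [pvSpec, pvFlip_pchar]

-- ===== VERDICT (by name: the statement is the Claim_ definition above) =====
theorem switch_lights_spec : Claim_equal_switch_lights := by
  intro s k _
  unfold Spec_switch_lights switch_lights switch_lights_alt
  dsimp only
  set l := s.toList with hl
  set t : Int := min k (l.length : Int) with ht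
  set m : Nat := t.toNat with hmdef
  have hm_le : m ≤ l.length := by omega
  -- B side
  have hmax : max 0 t = ((m : Nat) : Int) := by omega
  rw [hmax, PySem.List.slice_to_natCast, PySem.List.slice_from_natCast, foldB]
  -- A side, first loop
  rw [PySem.List.pyRange_one 0 t, List.foldl_map]
  have hfun1 : (fun (fc : List Char) (j : Nat) =>
      if (PySem.List.pyGet? l (0 + (j : Int))).getD ' ' = 'O' then
        fc.set (0 + (j : Int)).toNat 'X'
      else fc.set (0 + (j : Int)).toNat 'O')
      = (fun fc j => if (l[j]?).getD ' ' = 'O' then fc.set j 'X' else fc.set j 'O') := by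
    funext fc j
    simp
  rw [show (t - 0).toNat = m from by omega, hfun1, loopA1 l m hm_le]
  -- second loop
  by_cases hn : (l.length : Int) > 1
  · rw [if_pos hn, PySem.List.pyRange_one 1 t, List.foldl_map]
    have hfun2 : (fun (fc : List Char) (j : Nat) =>
        if (PySem.List.pyGet? fc (1 + (j : Int) - 1)).getD ' ' = 'O' then
          (if (PySem.List.pyGet? fc (1 + (j : Int))).getD ' ' = 'O' then
            fc.set (1 + (j : Int)).toNat 'X'
          else fc.set (1 + (j : Int)).toNat 'O')
        else fc)
        = (fun fc j =>
          if (fc[j]?).getD ' ' = 'O' then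
            (if (fc[j+1]?).getD ' ' = 'O' then fc.set (j+1) 'X' else fc.set (j+1) 'O')
          else fc) := by
      funext fc j
      have h1 : 1 + (j : Int) - 1 = ((j : Nat) : Int) := by omega
      have h2 : 1 + (j : Int) = (((j + 1 : Nat)) : Int) := by omega
      rw [h1, h2]
      simp only [PySem.List.pyGet?_natCast, Int.toNat_natCast]
    rw [hfun2]
    by_cases ht2 : 2 ≤ m
    · rw [show (t - 1).toNat = (m - 1 - 1) + 1 from by omega,
        loopA2 l m ht2 hm_le ((m - 1 - 1) + 1) (by omega),
        show (m - 1 - 1) + 1 + 1 = m from by omega]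
      simp
    · rw [show (t - 1).toNat = 0 from by omega]
      simp [key_small l m (by omega)]
  · rw [if_neg hn]
    have : m ≤ 1 := by omega
    rw [key_small l m this]
    simp
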